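-- pv_equiv track=rewrite | github.com/colincwilson/phtrs | phtrs/natural_classes.py | subsumes
-- ===== SOURCE A (Python) =====
-- def subsumes(ftrs1, ftrs2):
--     """
--     Dictionary ftrs1 subsumes dictionary ftrs2 iff
--     every non-zero feature spec in ftrs1 is also in ftrs2.
--     """
--     for ftr, val1 in ftrs1.items():
--         if val1 == 0 or val1 == '0':
--             continue
--         if ftr not in ftrs2:
--             return False
--         val2 = ftrs2[ftr]
--         if val2 != val1:
--             return False
--     return True
-- ===== SOURCE B (Python) =====
-- def subsumes(ftrs1, ftrs2):
--     """
--     Dictionary ftrs1 subsumes dictionary ftrs2 iff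
--     every non-zero feature spec in ftrs1 is also in ftrs2.
--     Merge-and-compare: overlay ftrs1's non-zero specs on a copy of ftrs2;
--     ftrs1 subsumes ftrs2 exactly when the overlay changes nothing.
--     """
--     nz = {ftr: val for ftr, val in ftrs1.items() if val not in (0, '0')}
--     merged = dict(ftrs2)
--     merged.update(nz)
--     return merged == ftrs2
-- ===== Notes on version B (the rewrite author's own statement) =====
-- stated objective: alternative
-- what changed: Replaces A's early-exit per-pair membership-and-lookup loop with a merge-and-compare algorithm: build the dict of ftrs1's non-zero specs, overlay it on a copy of ftrs2 with dict.update, and return whether ftrs2 is a fixed point of that update (merged == ftrs2); no per-pair test is performed.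
import Mathlib
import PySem

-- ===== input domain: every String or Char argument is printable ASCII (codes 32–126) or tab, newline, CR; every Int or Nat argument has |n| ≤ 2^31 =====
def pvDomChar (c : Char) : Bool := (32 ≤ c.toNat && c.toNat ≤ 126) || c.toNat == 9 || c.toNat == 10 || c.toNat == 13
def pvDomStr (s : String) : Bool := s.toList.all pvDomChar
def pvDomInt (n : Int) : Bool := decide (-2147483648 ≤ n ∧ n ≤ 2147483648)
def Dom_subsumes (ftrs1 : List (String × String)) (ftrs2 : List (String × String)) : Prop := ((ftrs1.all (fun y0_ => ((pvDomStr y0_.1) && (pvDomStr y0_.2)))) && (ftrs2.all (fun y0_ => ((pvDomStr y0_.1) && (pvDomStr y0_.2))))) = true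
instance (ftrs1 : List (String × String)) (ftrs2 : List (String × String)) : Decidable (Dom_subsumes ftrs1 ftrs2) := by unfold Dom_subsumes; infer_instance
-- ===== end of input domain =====

-- B replaces A's early-exit membership/lookup loop by merge-and-compare: overlay ftrs1's
-- non-zero specs on a copy of ftrs2 and test whether the overlay changed nothing (alternative
-- decomposition, same cost).

-- ===== PORT A =====
-- The dicts are built from the association lists with Python's dict semantics (PySem.Dict.ofList).
-- 'val1 == 0' is always False for the str values of this domain, so only 'val1 == "0"' is ported.
def subsumesLoop (d2 : PySem.Dict String String) : List (String × String) → Bool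
  | [] => true
  | (ftr, val1) :: rest =>
    if val1 == "0" then subsumesLoop d2 rest
    else if !(d2.contains ftr) then false
    else
      let val2 := d2.getD ftr ""
      if val2 != val1 then false
      else subsumesLoop d2 rest

def subsumes (ftrs1 : List (String × String)) (ftrs2 : List (String × String)) : Bool :=
  subsumesLoop (PySem.Dict.ofList ftrs2) (PySem.Dict.ofList ftrs1).items

-- ===== PORT B =====
-- Python's dict == compares the key→value mappings ignoring insertion order: ported exactly as
-- size equality plus a lookup of each item of the left dict in the right one.
def pyDictEq (d1 d2 : PySem.Dict String String) : Bool :=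
  (d1.size == d2.size) && d1.items.all (fun p => d2.get? p.1 == some p.2)

def subsumes_alt (ftrs1 : List (String × String)) (ftrs2 : List (String × String)) : Bool :=
  let nz : PySem.Dict String String :=
    PySem.Dict.ofList (((PySem.Dict.ofList ftrs1).items).filter (fun p => !(p.2 == "0")))
  let merged := (PySem.Dict.ofList ftrs2).update nz.items
  pyDictEq merged (PySem.Dict.ofList ftrs2)

-- ===== PRECONDITION & SPEC =====
def Spec_subsumes (ftrs1 : List (String × String)) (ftrs2 : List (String × String)) (out : Bool) : Prop := out = subsumes_alt ftrs1 ftrs2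
instance (ftrs1 : List (String × String)) (ftrs2 : List (String × String)) (out : Bool) : Decidable (Spec_subsumes ftrs1 ftrs2 out) := by unfold Spec_subsumes; infer_instance

-- ===== CLAIM (what is proved, stated in full; the proofs are below) =====
def Claim_equal_subsumes : Prop := ∀ (ftrs1 : List (String × String)) (ftrs2 : List (String × String)), Dom_subsumes ftrs1 ftrs2 → Spec_subsumes ftrs1 ftrs2 (subsumes ftrs1 ftrs2)

-- ===== LEMMAS AND PROOFS =====

-- A's per-item test (membership then lookup) is exactly 'get? returns this value'.
theorem item_check (d : PySem.Dict String String) (k v : String) :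
    (d.contains k && (d.getD k "" == v)) = true ↔ d.get? k = some v := by
  rw [PySem.Dict.contains_eq_isSome_get?, PySem.Dict.getD_eq_get?_getD]
  cases h : d.get? k <;> simp

-- A's loop is the conjunction of the per-item tests over the non-zero items.
theorem subsumesLoop_eq_all (d2 : PySem.Dict String String) (l : List (String × String)) :
    subsumesLoop d2 l
      = (l.filter (fun p => !(p.2 == "0"))).all
          (fun p => d2.contains p.1 && (d2.getD p.1 "" == p.2)) := by
  induction l with
  | nil => rfl
  | cons p rest ih =>
    obtain ⟨k, v⟩ := p
    by_cases h0 : v = "0"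
    · simp [subsumesLoop, h0, ih]
    · by_cases hc : d2.contains k = true
      · by_cases hv : d2.getD k "" = v
        · simp [subsumesLoop, h0, hc, hv, ih]
        · simp [subsumesLoop, h0, hc, hv]
      · simp [subsumesLoop, h0, hc]

-- dict.update is a left fold of inserts (definitional in PySem).
theorem update_eq_foldl (d : PySem.Dict String String) (l : List (String × String)) :
    d.update l = l.foldl (fun d p => d.insert p.1 p.2) d := rfl

theorem get?_update_not_mem (l : List (String × String)) (d : PySem.Dict String String)
    (k : String) (h : k ∉ l.map Prod.fst) :
    (d.update l).get? k = d.get? k := by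
  induction l generalizing d with
  | nil => rfl
  | cons p rest ih =>
    simp only [List.map_cons, List.mem_cons, not_or] at h
    rw [update_eq_foldl] at *
    simp only [List.foldl_cons]
    rw [← update_eq_foldl, ih _ h.2, PySem.Dict.get?_insert_of_ne _ _ h.1]

theorem get?_update_mem (l : List (String × String)) (d : PySem.Dict String String)
    (k v : String) (hnd : (l.map Prod.fst).Nodup) (hmem : (k, v) ∈ l) :
    (d.update l).get? k = some v := by
  induction l generalizing d with
  | nil => cases hmem
  | cons p rest ih =>
    simp only [List.map_cons, List.nodup_cons] at hnd
    rw [update_eq_foldl]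
    simp only [List.foldl_cons]
    rw [← update_eq_foldl]
    rcases List.mem_cons.mp hmem with heq | hrest
    · subst heq
      rw [get?_update_not_mem _ _ _ hnd.1, PySem.Dict.get?_insert_self]
    · exact ih _ hnd.2 hrest

-- k is a key of d iff d.get? k returns something.
theorem mem_keys_iff_get? (d : PySem.Dict String String) (k : String) :
    k ∈ d.keys ↔ d.get? k ≠ none := by
  rw [Ne, PySem.Dict.get?_eq_none_iff_not_mem_keys, not_not]

-- Python dict equality (for dicts with unique keys) is pointwise equality of lookups.
theorem pyDictEq_iff (d1 d2 : PySem.Dict String String)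
    (h1 : d1.keys.Nodup) (h2 : d2.keys.Nodup) :
    pyDictEq d1 d2 = true ↔ ∀ k, d1.get? k = d2.get? k := by
  unfold pyDictEq
  simp only [Bool.and_eq_true, beq_iff_eq, List.all_eq_true]
  constructor
  · rintro ⟨hsize, hall⟩ k
    have hsub : ∀ k v, d1.get? k = some v → d2.get? k = some v := by
      intro k v hget
      have := hall _ (PySem.Dict.mem_items_of_get?_eq_some _ hget)
      simpa using this
    have hkeys : d1.keys ⊆ d2.keys := by
      intro a ha
      rcases Option.ne_none_iff_exists'.mp ((mem_keys_iff_get? d1 a).mp ha) with ⟨v, hv⟩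
      exact (mem_keys_iff_get? d2 a).mpr (by rw [hsub a v hv]; simp)
    have hlen : d2.keys.length ≤ d1.keys.length := by
      have e1 : d1.keys.length = d1.size := by
        simp [PySem.Dict.keys, PySem.Dict.size]
      have e2 : d2.keys.length = d2.size := by
        simp [PySem.Dict.keys, PySem.Dict.size]
      omega
    have hperm : d1.keys.Perm d2.keys := (h1.subperm hkeys).perm_of_length_le hlen
    cases hget : d1.get? k with
    | none =>
      have : k ∉ d2.keys := fun hk =>
        ((mem_keys_iff_get? d1 k).mp (hperm.mem_iff.mpr hk)) hget
      rw [← PySem.Dict.get?_eq_none_iff_not_mem_keys] at this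
      exact this.symm
    | some v => exact (hsub k v hget).symm
  · intro h
    have hperm : d1.keys.Perm d2.keys := by
      refine (List.perm_ext_iff_of_nodup h1 h2).mpr ?_
      intro a
      rw [mem_keys_iff_get?, mem_keys_iff_get?, h a]
    constructor
    · have e1 : d1.keys.length = d1.size := by
        simp [PySem.Dict.keys, PySem.Dict.size]
      have e2 : d2.keys.length = d2.size := by
        simp [PySem.Dict.keys, PySem.Dict.size]
      have := hperm.length_eq
      omega
    · intro p hp
      have hm : (p.1, p.2) ∈ d1.items := by simpa only [Prod.mk.eta] using hp
      have := PySem.Dict.get?_of_mem_items _ hm h1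
      simp [← h p.1, this]

-- A dict built from a list with distinct keys has exactly that list as items.
theorem items_ofList_of_nodup_keys (l : List (String × String))
    (h : (l.map Prod.fst).Nodup) : (PySem.Dict.ofList l).items = l := by
  have hfresh : ∀ a ∈ l, (PySem.Dict.empty : PySem.Dict String String).contains a.1 = false := by
    intro a _; simp [PySem.Dict.contains_empty]
  have := PySem.Dict.items_foldl_insert_fresh l Prod.fst Prod.snd
    (PySem.Dict.empty : PySem.Dict String String) hfresh h
  simpa using this

-- ===== VERDICT (by name: the statement is the Claim_ definition above) =====
theorem subsumes_spec : Claim_equal_subsumes := by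
  intro ftrs1 ftrs2 _
  unfold Spec_subsumes subsumes subsumes_alt
  set d1 := PySem.Dict.ofList ftrs1 with hd1
  set d2 := PySem.Dict.ofList ftrs2 with hd2
  set l := d1.items.filter (fun p => !(p.2 == "0")) with hl
  have h2 : d2.keys.Nodup := PySem.Dict.nodup_keys_ofList _
  have hndl : (l.map Prod.fst).Nodup := by
    have h1 : (d1.items.map Prod.fst).Nodup := PySem.Dict.nodup_keys_ofList _
    have hs : l.Sublist d1.items := by rw [hl]; exact List.filter_sublist
    exact (hs.map Prod.fst).nodup h1
  rw [subsumesLoop_eq_all]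
  simp only [items_ofList_of_nodup_keys l hndl]
  apply Bool.eq_iff_iff.mpr
  rw [pyDictEq_iff _ _ (PySem.Dict.nodup_keys_update _ _ h2) h2]
  simp only [List.all_eq_true]
  constructor
  · intro h k
    by_cases hk : k ∈ l.map Prod.fst
    · rcases List.mem_map.mp hk with ⟨p, hp, rfl⟩
      rw [get?_update_mem l d2 p.1 p.2 hndl (by simpa only [Prod.mk.eta] using hp)]
      exact ((item_check d2 p.1 p.2).mp (h p hp)).symm
    · exact get?_update_not_mem l d2 k hk
  · intro h p hp
    refine (item_check d2 p.1 p.2).mpr ?_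
    rw [← h p.1, get?_update_mem l d2 p.1 p.2 hndl (by simpa only [Prod.mk.eta] using hp)]
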